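-- pv_equiv track=rewrite | github.com/koespruyt/HPE_Support_BOT | hpe_cases_overview.py | extract_subject
-- ===== SOURCE A (Python) =====
-- def extract_subject(block: str) -> str:
--     if not block:
--         return ""
--     lines = [l.strip() for l in block.splitlines()]
--     for i, l in enumerate(lines):
--         if l.lower() == "subject":
--             for j in range(i + 1, min(i + 12, len(lines))):
--                 if lines[j]:
--                     return lines[j]
--     return ""
-- ===== SOURCE B (Python) =====
-- def extract_subject(block: str) -> str:
--     if not block:
--         return ""
--     remaining = 0
--     for l in (x.strip() for x in block.splitlines()):
--         if remaining > 0: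
--             if l:
--                 return l
--             remaining -= 1
--         if l.lower() == "subject":
--             remaining = 11
--     return ""
-- ===== Notes on version B (the rewrite author's own statement) =====
-- stated objective: simpler
-- what changed: Replaces the nested scan (for each 'subject' label, an inner window scan with index arithmetic) by one linear pass keeping a single integer countdown of remaining window lines.
import Mathlib
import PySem

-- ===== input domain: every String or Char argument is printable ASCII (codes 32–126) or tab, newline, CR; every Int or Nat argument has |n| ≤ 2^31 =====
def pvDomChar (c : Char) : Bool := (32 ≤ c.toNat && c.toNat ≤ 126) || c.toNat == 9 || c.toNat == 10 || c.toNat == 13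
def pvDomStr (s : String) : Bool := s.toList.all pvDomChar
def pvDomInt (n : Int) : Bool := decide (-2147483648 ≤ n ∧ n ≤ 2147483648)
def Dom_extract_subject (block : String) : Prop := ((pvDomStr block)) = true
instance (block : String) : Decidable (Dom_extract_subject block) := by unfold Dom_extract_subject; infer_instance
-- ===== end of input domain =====

-- B replaces A's nested scan by a single pass with an integer countdown; objective: simpler.

-- ===== PORT A =====
-- inner loop: for j in range(i+1, min(i+12, len(lines))): if lines[j]: return lines[j]
def pvAInner (lines : List String) (j stop : Nat) : Option String :=
  if j < stop then
    if lines.getD j "" ≠ "" then some (lines.getD j "")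
    else pvAInner lines (j + 1) stop
  else none
termination_by stop - j

-- outer loop: for i, l in enumerate(lines): ...
def pvAOuter (lines : List String) : Nat → List String → String
  | _, [] => ""
  | i, l :: rest =>
    if PySem.Str.lower l = "subject" then
      match pvAInner lines (i + 1) (min (i + 12) lines.length) with
      | some s => s
      | none => pvAOuter lines (i + 1) rest
    else pvAOuter lines (i + 1) rest

def extract_subject (block : String) : String :=
  if block = "" then ""
  else
    let lines := (PySem.Str.splitlines block).map PySem.Str.strip
    pvAOuter lines 0 lines

-- ===== PORT B =====
-- single pass with countdown `remaining`
def pvBLoop : Nat → List String → String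
  | _, [] => ""
  | remaining, l :: rest =>
    if remaining > 0 ∧ l ≠ "" then l
    else
      let remaining' := if remaining > 0 then remaining - 1 else remaining
      let remaining'' := if PySem.Str.lower l = "subject" then 11 else remaining'
      pvBLoop remaining'' rest

def extract_subject_alt (block : String) : String :=
  if block = "" then ""
  else pvBLoop 0 ((PySem.Str.splitlines block).map PySem.Str.strip)

-- ===== PRECONDITION & SPEC =====
def Spec_extract_subject (block : String) (out : String) : Prop := out = extract_subject_alt block
instance (block : String) (out : String) : Decidable (Spec_extract_subject block out) := by unfold Spec_extract_subject; infer_instance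

-- ===== CLAIM (what is proved, stated in full; the proofs are below) =====
def Claim_equal_extract_subject : Prop := ∀ (block : String), Dom_extract_subject block → Spec_extract_subject block (extract_subject block)

-- ===== LEMMAS AND PROOFS =====

-- A's outer loop, rephrased structurally on the remaining suffix of lines
def pvAList : List String → String
  | [] => ""
  | l :: rest =>
    if PySem.Str.lower l = "subject" then
      match (rest.take 11).find? (fun s => s != "") with
      | some s => s
      | none => pvAList rest
    else pvAList rest

theorem pvAInner_eq (lines : List String) (j stop : Nat) (hstop : stop ≤ lines.length) :
    pvAInner lines j stop = ((lines.drop j).take (stop - j)).find? (fun s => s != "") := by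
  by_cases h : j < stop
  · have hj : j < lines.length := lt_of_lt_of_le h hstop
    have hget : lines.getD j "" = lines[j] := List.getD_eq_getElem lines "" hj
    rw [pvAInner, hget]
    have hd : lines.drop j = lines[j] :: lines.drop (j + 1) := List.drop_eq_getElem_cons hj
    have hsub : stop - j = (stop - (j + 1)) + 1 := by omega
    rw [hd, hsub, List.take_succ_cons, List.find?_cons]
    by_cases hne : lines[j] = ""
    · simp only [hne, if_pos h, if_neg (by simp : ¬ ("" : String) ≠ "")]
      simp [pvAInner_eq lines (j + 1) stop hstop]
    · have hb : (lines[j] != "") = true := bne_iff_ne.mpr hne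
      simp [h, hb, hne]
  · rw [pvAInner]
    have : stop - j = 0 := by omega
    simp [h, this]
termination_by stop - j

theorem pvAOuter_eq (lines : List String) (i : Nat) (rest : List String)
    (h : lines.drop i = rest) : pvAOuter lines i rest = pvAList rest := by
  induction rest generalizing i with
  | nil => rfl
  | cons l rest ih =>
    have hlen : i < lines.length := by
      by_contra hc
      simp [List.drop_eq_nil_of_le (Nat.le_of_not_lt hc)] at h
    have hdrop : lines.drop (i + 1) = rest := by
      rw [← List.drop_drop, h]; rfl
    have hinner : pvAInner lines (i + 1) (min (i + 12) lines.length)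
        = (rest.take 11).find? (fun s => s != "") := by
      rw [pvAInner_eq lines (i + 1) _ (Nat.min_le_right _ _), hdrop]
      have : min (i + 12) lines.length - (i + 1) = min 11 (lines.length - (i + 1)) := by omega
      rw [this]
      have : rest.take (min 11 (lines.length - (i + 1))) = rest.take 11 := by
        have hr : rest.length = lines.length - (i + 1) := by
          rw [← hdrop, List.length_drop]
        rcases Nat.le_total 11 (lines.length - (i + 1)) with hle | hle
        · rw [Nat.min_eq_left hle]
        · rw [Nat.min_eq_right hle, ← hr, List.take_length,
            List.take_of_length_le (by omega)]
      rw [this]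
    rw [pvAOuter, pvAList, hinner]
    by_cases hs : PySem.Str.lower l = "subject"
    · simp only [hs, if_true]
      cases (rest.take 11).find? (fun s => s != "") with
      | some s => rfl
      | none => exact ih (i + 1) hdrop
    · simp only [hs, if_false]
      exact ih (i + 1) hdrop

-- skipping a prefix of empty lines does not change A's structural loop
theorem pvAList_drop_empty (k : Nat) (ls : List String)
    (h : ∀ s ∈ ls.take k, s = "") : pvAList ls = pvAList (ls.drop k) := by
  induction k generalizing ls with
  | zero => rfl
  | succ k ih =>
    cases ls with
    | nil => rfl
    | cons l rest =>
      have hl : l = "" := h l (by simp)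
      have hrest : ∀ s ∈ rest.take k, s = "" := by
        intro s hs; exact h s (by simp [hs])
      have hns : PySem.Str.lower l ≠ "subject" := by
        subst hl; decide
      rw [pvAList]
      simp only [hns, if_false, List.drop_succ_cons]
      exact ih rest hrest

theorem pvBLoop_eq (ls : List String) (rem : Nat) :
    pvBLoop rem ls =
      match (ls.take rem).find? (fun s => s != "") with
      | some s => s
      | none => pvAList (ls.drop rem) := by
  induction ls generalizing rem with
  | nil => simp [pvBLoop, pvAList]
  | cons l rest ih =>
    rw [pvBLoop]
    by_cases hrem : rem > 0
    · obtain ⟨m, rfl⟩ : ∃ m, rem = m + 1 := ⟨rem - 1, by omega⟩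
      by_cases hl : l ≠ ""
      · simp [hrem, hl]
      · simp only [not_not] at hl
        subst hl
        have h1 : ¬ (m + 1 > 0 ∧ ("" : String) ≠ "") := by simp
        have h2 : PySem.Str.lower "" ≠ "subject" := by decide
        simp only [if_false, hrem, if_true, h2, Nat.add_sub_cancel]
        rw [ih m]
        simp
    · have hrem0 : rem = 0 := by omega
      subst hrem0
      have h1 : ¬ ((0 : Nat) > 0 ∧ l ≠ "") := by simp
      simp only [if_false, gt_iff_lt, Nat.lt_irrefl, if_false]
      by_cases hs : PySem.Str.lower l = "subject"
      · simp only [hs, if_true]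
        rw [ih 11]
        simp only [List.take_zero, List.find?_nil, List.drop_zero]
        rw [pvAList]
        simp only [hs, if_true]
        cases hfind : (rest.take 11).find? (fun s => s != "") with
        | some s => rfl
        | none =>
          have hemp : ∀ s ∈ rest.take 11, s = "" := by
            intro s hsmem
            have := List.find?_eq_none.mp hfind s hsmem
            simpa using this
          exact (pvAList_drop_empty 11 rest hemp).symm
      · simp only [hs, if_false]
        rw [ih 0]
        simp only [List.take_zero, List.find?_nil, List.drop_zero]
        rw [pvAList]
        simp [hs]

-- ===== VERDICT (by name: the statement is the Claim_ definition above) =====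
theorem extract_subject_spec : Claim_equal_extract_subject := by
  intro block _
  unfold Spec_extract_subject extract_subject extract_subject_alt
  by_cases hb : block = ""
  · simp [hb]
  · simp only [hb, if_false]
    set lines := (PySem.Str.splitlines block).map PySem.Str.strip
    rw [pvAOuter_eq lines 0 lines (by simp), pvBLoop_eq]
    simp
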